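-- pv_equiv track=rewrite | github.com/Hanna-hemati/SmartCityRoutePlanner | main.py | get_scenario_weight
-- ===== SOURCE A (Python) =====
-- def get_scenario_weight(scenario):
--     scenario = scenario.lower()
--
--     mapping = {
--         "light traffic": 0,
--         "moderate traffic": 1,
--         "heavy traffic": 2,
--         "rain": 1,
--         "snow": 2,
--         "storm": 3,
--         "fog": 1,
--         "clear": 0,
--         "cloudy": 0,
--         "road block": 3,
--         "accident": 2,
--         "flood": 3,
--         "construction": 2,
--     }
--
--     weight = 0
--     for key, val in mapping.items():
--         if key in scenario:
--             weight = max(weight, val)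
--
--     return weight
-- ===== SOURCE B (Python) =====
-- TIERS = [
--     (3, ["storm", "road block", "flood"]),
--     (2, ["heavy traffic", "snow", "accident", "construction"]),
--     (1, ["moderate traffic", "rain", "fog"]),
-- ]
--
-- def get_scenario_weight(scenario):
--     s = scenario.lower()
--     for weight, keywords in TIERS:
--         if any(k in s for k in keywords):
--             return weight
--     return 0
-- ===== Notes on version B (the rewrite author's own statement) =====
-- stated objective: alternative
-- what changed: B inverts the keyword->weight dict into weight tiers sorted descending and returns the first tier with a matching keyword (early exit, weight-0 keywords dropped), instead of A's full scan accumulating a running max over all 13 keys.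
import Mathlib
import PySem

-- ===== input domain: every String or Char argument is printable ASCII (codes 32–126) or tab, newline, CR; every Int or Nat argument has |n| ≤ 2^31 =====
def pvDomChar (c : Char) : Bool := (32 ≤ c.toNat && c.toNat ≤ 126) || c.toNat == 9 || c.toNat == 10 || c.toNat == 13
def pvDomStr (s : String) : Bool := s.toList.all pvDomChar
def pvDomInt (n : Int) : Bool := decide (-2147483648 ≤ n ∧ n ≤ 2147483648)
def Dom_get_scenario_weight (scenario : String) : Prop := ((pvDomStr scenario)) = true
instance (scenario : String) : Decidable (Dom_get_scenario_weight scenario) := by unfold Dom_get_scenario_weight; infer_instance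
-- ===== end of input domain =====

-- B inverts the keyword->weight dict into descending weight tiers and returns the first matching tier (early exit); same results as A's running-max full scan.

-- ===== PORT A =====
def get_scenario_weight (scenario : String) : Int :=
  let s := PySem.Str.lower scenario
  let mapping : PySem.Dict String Int := PySem.Dict.mk
    [("light traffic", 0), ("moderate traffic", 1), ("heavy traffic", 2),
     ("rain", 1), ("snow", 2), ("storm", 3), ("fog", 1), ("clear", 0),
     ("cloudy", 0), ("road block", 3), ("accident", 2), ("flood", 3),
     ("construction", 2)]
  mapping.items.foldl (fun weight kv => if PySem.Str.isIn kv.1 s then max weight kv.2 else weight) 0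

-- ===== PORT B =====
def pvTiers : List (Int × List String) :=
  [(3, ["storm", "road block", "flood"]),
   (2, ["heavy traffic", "snow", "accident", "construction"]),
   (1, ["moderate traffic", "rain", "fog"])]

def pvTierScan (s : String) : List (Int × List String) → Int
  | [] => 0
  | (w, kws) :: rest => if kws.any (fun k => PySem.Str.isIn k s) then w else pvTierScan s rest

def get_scenario_weight_alt (scenario : String) : Int :=
  pvTierScan (PySem.Str.lower scenario) pvTiers

-- ===== PRECONDITION & SPEC =====
def Spec_get_scenario_weight (scenario : String) (out : Int) : Prop := out = get_scenario_weight_alt scenario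
instance (scenario : String) (out : Int) : Decidable (Spec_get_scenario_weight scenario out) := by unfold Spec_get_scenario_weight; infer_instance

-- ===== CLAIM (what is proved, stated in full; the proofs are below) =====
def Claim_equal_get_scenario_weight : Prop := ∀ (scenario : String), Dom_get_scenario_weight scenario → Spec_get_scenario_weight scenario (get_scenario_weight scenario)

-- ===== LEMMAS AND PROOFS =====
-- both programs seen as functions of the 13 substring-match booleans; 8192-case check by kernel evaluation
set_option maxHeartbeats 1000000 in
theorem pv_abstract : ∀ (b1 b2 b3 b4 b5 b6 b7 b8 b9 b10 b11 b12 b13 : Bool),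
    ([(b1,(0:Int)),(b2,1),(b3,2),(b4,1),(b5,2),(b6,3),(b7,1),(b8,0),(b9,0),(b10,3),(b11,2),(b12,3),(b13,2)].foldl
      (fun w p => if p.1 then max w p.2 else w) 0)
    = (if b6 || (b10 || (b12 || false)) then 3 else if b3 || (b5 || (b11 || (b13 || false))) then 2 else if b2 || (b4 || (b7 || false)) then 1 else 0) := by
  decide

theorem pv_key (s : String) :
    ([("light traffic", (0:Int)), ("moderate traffic", 1), ("heavy traffic", 2),
      ("rain", 1), ("snow", 2), ("storm", 3), ("fog", 1), ("clear", 0),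
      ("cloudy", 0), ("road block", 3), ("accident", 2), ("flood", 3),
      ("construction", 2)].foldl
        (fun weight kv => if PySem.Str.isIn kv.1 s then max weight kv.2 else weight) 0)
    = pvTierScan s pvTiers := by
  have h := pv_abstract (PySem.Str.isIn "light traffic" s) (PySem.Str.isIn "moderate traffic" s)
    (PySem.Str.isIn "heavy traffic" s) (PySem.Str.isIn "rain" s) (PySem.Str.isIn "snow" s)
    (PySem.Str.isIn "storm" s) (PySem.Str.isIn "fog" s) (PySem.Str.isIn "clear" s)
    (PySem.Str.isIn "cloudy" s) (PySem.Str.isIn "road block" s) (PySem.Str.isIn "accident" s)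
    (PySem.Str.isIn "flood" s) (PySem.Str.isIn "construction" s)
  simpa only [List.foldl, pvTiers, pvTierScan, List.any_cons, List.any_nil] using h

-- ===== VERDICT (by name: the statement is the Claim_ definition above) =====
theorem get_scenario_weight_spec : Claim_equal_get_scenario_weight := by
  intro scenario _
  unfold Spec_get_scenario_weight get_scenario_weight get_scenario_weight_alt
  exact pv_key (PySem.Str.lower scenario)
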